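-- pv_equiv track=rewrite | github.com/antoineprudhomme5/hackerrank | interview/misc/friend-circle-queries.py | max_circle
-- ===== SOURCE A (Python) =====
-- def get_root(parents, v):
--   root = v
--   while root in parents:
--     root = parents.get(root)
--   return root
--
-- def max_circle(queries):
--   answers = []
--   parents = {}
--   sizes = {}
--   current_max_size = 1
--
--   for query in queries:
--     a, b = query[0], query[1]
--     root_a, root_b = get_root(parents, a), get_root(parents, b)
--     if root_a == root_b:
--       answers.append(current_max_size)
--       continue
--
--     size_a = sizes.get(root_a) if root_a in sizes else 1
--     size_b = sizes.get(root_b) if root_b in sizes else 1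
--
--
--     parents[root_a] = root_b
--
--     sizes[root_b] = size_a + size_b
--
--     current_max_size = max(size_a + size_b, current_max_size)
--
--     answers.append(current_max_size)
--
--   return answers
-- ===== SOURCE B (Python) =====
-- def max_circle(queries):
--     answers = []
--     root = {}      # node -> its current representative (absent = itself)
--     members = {}   # representative -> list of all nodes in its component (absent = just itself)
--     sizes = {}     # representative -> component size (absent = 1)
--     cur = 1
--     for q in queries:
--         a, b = q[0], q[1]
--         ra = root.get(a, a)
--         rb = root.get(b, b)
--         if ra == rb:
--             answers.append(cur)
--         else:
--             sa = sizes.get(ra, 1)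
--             sb = sizes.get(rb, 1)
--             if sa < sb:
--                 small, big = ra, rb
--             else:
--                 small, big = rb, ra
--             grp = members.get(small, [small])
--             for k in grp:
--                 root[k] = big
--             members.setdefault(big, [big]).extend(grp)
--             sizes[big] = sa + sb
--             if cur < sa + sb:
--                 cur = sa + sb
--             answers.append(cur)
--     return answers
-- ===== Notes on version B (the rewrite author's own statement) =====
-- stated objective: alternative
-- what changed: A follows uncompressed parent-pointer chains in a union-find forest (find walks a chain); B keeps a flat node-to-representative label map with per-component member lists and relabels the smaller component on each union (small-to-large), so find is a single dict lookup.
import Mathlib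
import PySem

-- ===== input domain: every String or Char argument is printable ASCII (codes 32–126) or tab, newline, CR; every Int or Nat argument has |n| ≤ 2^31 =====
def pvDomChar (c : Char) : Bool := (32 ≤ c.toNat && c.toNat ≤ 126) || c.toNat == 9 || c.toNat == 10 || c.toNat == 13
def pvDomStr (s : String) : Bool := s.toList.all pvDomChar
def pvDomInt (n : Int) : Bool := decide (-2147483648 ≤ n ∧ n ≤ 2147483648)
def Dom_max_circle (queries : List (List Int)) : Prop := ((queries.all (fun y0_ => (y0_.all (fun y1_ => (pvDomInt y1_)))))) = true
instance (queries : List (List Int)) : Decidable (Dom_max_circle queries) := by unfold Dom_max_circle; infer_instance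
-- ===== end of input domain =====

-- B replaces A's parent-chain union-find forest (find = follow parent pointers, no compression)
-- by a flat node-to-representative label map with per-component member lists: find is one lookup
-- and each union relabels the smaller component (small-to-large).

-- ===== PORT A =====
-- A's `get_root`: `while root in parents: root = parents.get(root)`, ported with fuel
-- `parents.size + 1`.  In every state `max_circle` reaches the parents map is acyclic and a chain
-- visits distinct keys, so the fuel is never exhausted (established by the invariant in the proofs
-- below); the fuel only makes the same loop total.
def getRootF : Nat → PySem.Dict Int Int → Int → Int
  | 0, _, root => root
  | n+1, parents, root =>
    match parents.get? root with
    | none => root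
    | some w => getRootF n parents w

def get_root (parents : PySem.Dict Int Int) (v : Int) : Int :=
  getRootF (parents.size + 1) parents v

-- the body of A's `for query in queries` loop, acting on (answers, parents, sizes, current_max)
def maxCircleStepA (st : List Int × PySem.Dict Int Int × PySem.Dict Int Int × Int)
    (query : List Int) : List Int × PySem.Dict Int Int × PySem.Dict Int Int × Int :=
  match st with
  | (answers, parents, sizes, curMax) =>
    match PySem.List.pyGet? query 0, PySem.List.pyGet? query 1 with
    | some a, some b =>
      let rootA := get_root parents a
      let rootB := get_root parents b
      if rootA = rootB then (answers ++ [curMax], parents, sizes, curMax)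
      else
        -- size_a = sizes.get(root_a) if root_a in sizes else 1  (and likewise size_b)
        let sizeA := if sizes.contains rootA then sizes.getD rootA 1 else 1
        let sizeB := if sizes.contains rootB then sizes.getD rootB 1 else 1
        let parents' := parents.insert rootA rootB
        let sizes' := sizes.insert rootB (sizeA + sizeB)
        let cur' := max (sizeA + sizeB) curMax
        (answers ++ [cur'], parents', sizes', cur')
    | _, _ => (answers, parents, sizes, curMax)  -- query[0]/query[1] raises IndexError: outside Pre_

def max_circle (queries : List (List Int)) : List Int :=
  (queries.foldl maxCircleStepA ([], PySem.Dict.empty, PySem.Dict.empty, 1)).1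

-- ===== PORT B =====
-- the body of B's loop, acting on (answers, root, members, sizes, cur)
def maxCircleStepB
    (st : List Int × PySem.Dict Int Int × PySem.Dict Int (List Int) × PySem.Dict Int Int × Int)
    (q : List Int) :
    List Int × PySem.Dict Int Int × PySem.Dict Int (List Int) × PySem.Dict Int Int × Int :=
  match st with
  | (answers, root, members, sizes, cur) =>
    match PySem.List.pyGet? q 0, PySem.List.pyGet? q 1 with
    | some a, some b =>
      let ra := root.getD a a
      let rb := root.getD b b
      if ra = rb then (answers ++ [cur], root, members, sizes, cur)
      else
        let sa := sizes.getD ra 1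
        let sb := sizes.getD rb 1
        let sb' := if sa < sb then (ra, rb) else (rb, ra)   -- small, big = …
        let small := sb'.1
        let big := sb'.2
        let grp := members.getD small [small]
        let root' := grp.foldl (fun d k => d.insert k big) root   -- for k in grp: root[k] = big
        -- members.setdefault(big, [big]).extend(grp)
        let members' := members.insert big (members.getD big [big] ++ grp)
        let sizes' := sizes.insert big (sa + sb)
        let cur' := if cur < sa + sb then sa + sb else cur
        (answers ++ [cur'], root', members', sizes', cur')
    | _, _ => (answers, root, members, sizes, cur)  -- q[0]/q[1] raises IndexError: outside Pre_

def max_circle_alt (queries : List (List Int)) : List Int :=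
  (queries.foldl maxCircleStepB
    ([], PySem.Dict.empty, PySem.Dict.empty, PySem.Dict.empty, 1)).1

-- ===== PRECONDITION & SPEC =====
-- Pre_ excludes only the queries shorter than two entries, on which A (and B) raises IndexError.
def Pre_max_circle (queries : List (List Int)) : Prop := ∀ q ∈ queries, 2 ≤ q.length
instance (queries : List (List Int)) : Decidable (Pre_max_circle queries) := by
  unfold Pre_max_circle; infer_instance

def pvWitness_max_circle : List (List Int) := [[1, 2], [3, 4], [2, 3], [1, 4]]

def Spec_max_circle (queries : List (List Int)) (out : List Int) : Prop := out = max_circle_alt queries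
instance (queries : List (List Int)) (out : List Int) : Decidable (Spec_max_circle queries out) := by
  unfold Spec_max_circle; infer_instance

-- ===== CLAIM (what is proved, stated in full; the proofs are below) =====
def Claim_equal_max_circle : Prop := ∀ (queries : List (List Int)), Dom_max_circle queries → Pre_max_circle queries → Spec_max_circle queries (max_circle queries)

-- ===== LEMMAS AND PROOFS =====

-- B's find: one lookup in the flat label map
def rootOf (r : PySem.Dict Int Int) (v : Int) : Int := r.getD v v

-- The coupling invariant between A's state (parents, sizesA) and B's state (root, members, sizesB):
-- A's chains end at true roots; B's labels are idempotent; members lists the components exactly;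
-- both states induce the same partition; the recorded component sizes agree.
def CoupleInv (p szA : PySem.Dict Int Int) (r : PySem.Dict Int Int)
    (mem : PySem.Dict Int (List Int)) (szB : PySem.Dict Int Int) : Prop :=
  (∀ v, p.get? (get_root p v) = none) ∧
  (∀ v, rootOf r (rootOf r v) = rootOf r v) ∧
  (∀ x, rootOf r x = x → ∀ v, (v ∈ mem.getD x [x] ↔ rootOf r v = x)) ∧
  (∀ v w, (get_root p v = get_root p w ↔ rootOf r v = rootOf r w)) ∧
  (∀ v, szA.getD (get_root p v) 1 = szB.getD (rootOf r v) 1)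

theorem foldl_insert_rootOf (l : List Int) (d : PySem.Dict Int Int) (c v : Int) :
    rootOf (l.foldl (fun d k => d.insert k c) d) v = if v ∈ l then c else rootOf d v := by
  induction l generalizing d with
  | nil => simp
  | cons k l ih =>
    rw [List.foldl_cons, ih]
    have : rootOf (d.insert k c) v = if v = k then c else rootOf d v := by
      simp [rootOf, PySem.Dict.getD_insert]
    rw [this]
    by_cases h1 : v ∈ l <;> by_cases h2 : v = k <;> simp [h1, h2]

theorem getRootF_insert (n : Nat) (p : PySem.Dict Int Int) (ra rb : Int)
    (hra : p.get? ra = none) (hrb : p.get? rb = none) (hne : ra ≠ rb) (v r : Int)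
    (hr : getRootF n p v = r) (hroot : p.get? r = none) :
    getRootF (n+1) (p.insert ra rb) v = if r = ra then rb else r := by
  induction n generalizing v with
  | zero =>
    simp only [getRootF] at hr
    subst hr
    by_cases h : v = ra
    · subst h
      simp [getRootF, PySem.Dict.get?_insert, hrb, hne.symm]
    · simp [getRootF, PySem.Dict.get?_insert, h, hroot]
  | succ n ih =>
    rw [show getRootF (n+1) p v = (match p.get? v with | none => v | some w => getRootF n p w) from rfl] at hr
    cases hpv : p.get? v with
    | none =>
      rw [hpv] at hr; subst hr
      by_cases h : v = ra
      · subst h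
        simp [getRootF, PySem.Dict.get?_insert, hrb, hne.symm]
      · simp [getRootF, PySem.Dict.get?_insert, h, hpv]
    | some w =>
      rw [hpv] at hr
      have hvra : v ≠ ra := by rintro rfl; rw [hra] at hpv; simp at hpv
      rw [show getRootF (n+1+1) (p.insert ra rb) v
            = (match (p.insert ra rb).get? v with | none => v | some w => getRootF (n+1) (p.insert ra rb) w) from rfl]
      simp only [PySem.Dict.get?_insert, if_neg hvra, hpv]
      exact ih w hr

theorem get_root_insert (p : PySem.Dict Int Int) (ra rb : Int)
    (hra : p.get? ra = none) (hrb : p.get? rb = none) (hne : ra ≠ rb) (v : Int)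
    (hroot : p.get? (get_root p v) = none) :
    get_root (p.insert ra rb) v = if get_root p v = ra then rb else get_root p v := by
  have hsize : (p.insert ra rb).size = p.size + 1 := by
    rw [PySem.Dict.get?_eq_none_iff_contains] at hra
    simp [PySem.Dict.size_insert, hra]
  unfold get_root
  rw [hsize]
  exact getRootF_insert (p.size + 1) p ra rb hra hrb hne v _ rfl hroot

-- the merge branch preserves the invariant (stated once, symmetric in B's (small, big) choice)
theorem inv_step (p szA : PySem.Dict Int Int) (r : PySem.Dict Int Int)
    (mem : PySem.Dict Int (List Int)) (szB : PySem.Dict Int Int) (a b small big : Int)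
    (hInv : CoupleInv p szA r mem szB)
    (hne : get_root p a ≠ get_root p b)
    (hsb : (small = rootOf r a ∧ big = rootOf r b) ∨ (small = rootOf r b ∧ big = rootOf r a)) :
    CoupleInv (p.insert (get_root p a) (get_root p b))
        (szA.insert (get_root p b) (szA.getD (get_root p a) 1 + szA.getD (get_root p b) 1))
        ((mem.getD small [small]).foldl (fun d k => d.insert k big) r)
        (mem.insert big (mem.getD big [big] ++ mem.getD small [small]))
        (szB.insert big (szB.getD (rootOf r a) 1 + szB.getD (rootOf r b) 1)) := by
  obtain ⟨hA1, hB2, hMEM, hC, hS1⟩ := hInv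
  set RA := get_root p a with hRA
  set RB := get_root p b with hRB
  have hRAroot : p.get? RA = none := hA1 a
  have hRBroot : p.get? RB = none := hA1 b
  -- B-side roots of a and b
  have hfa : rootOf r (rootOf r a) = rootOf r a := hB2 a
  have hfb : rootOf r (rootOf r b) = rootOf r b := hB2 b
  have hneB : rootOf r a ≠ rootOf r b := fun h => hne ((hC a b).mpr h)
  have hsmall_big_ne : small ≠ big := by
    rcases hsb with ⟨h1, h2⟩ | ⟨h1, h2⟩ <;> subst h1 <;> subst h2
    · exact hneB
    · exact hneB.symm
  have hFBsmall : rootOf r small = small := by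
    rcases hsb with ⟨h1, _⟩ | ⟨h1, _⟩ <;> subst h1 <;> [exact hfa; exact hfb]
  have hFBbig : rootOf r big = big := by
    rcases hsb with ⟨_, h2⟩ | ⟨_, h2⟩ <;> subst h2 <;> [exact hfb; exact hfa]
  -- correspondence between A-roots and B-roots of each node
  have hcorA : ∀ v, (get_root p v = RA ↔ rootOf r v = rootOf r a) := fun v => hC v a
  have hcorB : ∀ v, (get_root p v = RB ↔ rootOf r v = rootOf r b) := fun v => hC v b
  have hmemsmall : ∀ v, (v ∈ mem.getD small [small] ↔ rootOf r v = small) := hMEM small hFBsmall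
  have hmembig : ∀ v, (v ∈ mem.getD big [big] ↔ rootOf r v = big) := hMEM big hFBbig
  -- characterisation of the two new find functions
  have hFB' : ∀ v, rootOf ((mem.getD small [small]).foldl (fun d k => d.insert k big) r) v
      = if rootOf r v = small then big else rootOf r v := by
    intro v
    rw [foldl_insert_rootOf]
    by_cases h : rootOf r v = small <;> simp [h, hmemsmall v]
  have hFA' : ∀ v, get_root (p.insert RA RB) v
      = if get_root p v = RA then RB else get_root p v := fun v =>
    get_root_insert p RA RB hRAroot hRBroot hne v (hA1 v)
  -- the {small, big} / {rootOf a, rootOf b} correspondence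
  have hpair : ∀ v, (rootOf r v = small ∨ rootOf r v = big)
      ↔ (rootOf r v = rootOf r a ∨ rootOf r v = rootOf r b) := by
    intro v
    rcases hsb with ⟨h1, h2⟩ | ⟨h1, h2⟩ <;> subst h1 <;> subst h2 <;> tauto
  have hbigmem : big = rootOf r a ∨ big = rootOf r b := by
    rcases hsb with ⟨_, h2⟩ | ⟨_, h2⟩ <;> subst h2 <;> tauto
  -- "lands on the merged class" is the same on both sides
  have hland : ∀ v, (get_root p v = RA ∨ get_root p v = RB)
      ↔ (rootOf r v = small ∨ rootOf r v = big) := by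
    intro v
    rw [hpair v]
    constructor
    · rintro (h | h)
      · exact Or.inl ((hcorA v).mp h)
      · exact Or.inr ((hcorB v).mp h)
    · rintro (h | h)
      · exact Or.inl ((hcorA v).mpr h)
      · exact Or.inr ((hcorB v).mpr h)
  have hlandA : ∀ v, get_root (p.insert RA RB) v = RB ↔ (get_root p v = RA ∨ get_root p v = RB) := by
    intro v
    rw [hFA' v]
    by_cases h : get_root p v = RA <;> simp [h]
  have hlandB : ∀ v, rootOf ((mem.getD small [small]).foldl (fun d k => d.insert k big) r) v = big
      ↔ (rootOf r v = small ∨ rootOf r v = big) := by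
    intro v
    rw [hFB' v]
    by_cases h : rootOf r v = small <;> simp [h]
  have hlandAB : ∀ v, get_root (p.insert RA RB) v = RB
      ↔ rootOf ((mem.getD small [small]).foldl (fun d k => d.insert k big) r) v = big := by
    intro v; rw [hlandA v, hlandB v]; exact hland v
  -- off the merged class both finds are unchanged
  have hoffA : ∀ v, get_root (p.insert RA RB) v ≠ RB → get_root (p.insert RA RB) v = get_root p v := by
    intro v h
    rw [hFA' v] at h ⊢
    by_cases hv : get_root p v = RA <;> simp [hv] at h ⊢
  have hoffB : ∀ v, rootOf ((mem.getD small [small]).foldl (fun d k => d.insert k big) r) v ≠ big →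
      rootOf ((mem.getD small [small]).foldl (fun d k => d.insert k big) r) v = rootOf r v := by
    intro v h
    rw [hFB' v] at h ⊢
    by_cases hv : rootOf r v = small <;> simp [hv] at h ⊢
  refine ⟨?_, ?_, ?_, ?_, ?_⟩
  · -- A1'
    intro v
    rw [hFA' v]
    by_cases h : get_root p v = RA
    · simp only [if_pos h, PySem.Dict.get?_insert]
      rw [if_neg (Ne.symm hne), hRBroot]
    · simp only [if_neg h, PySem.Dict.get?_insert]
      exact hA1 v
  · -- B2'
    intro v
    rw [hFB' v]
    by_cases h : rootOf r v = small
    · rw [if_pos h, hFB' big, hFBbig, if_neg (Ne.symm hsmall_big_ne)]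
    · rw [if_neg h, hFB' (rootOf r v), hB2 v, if_neg h]
  · -- MEM'
    intro x hx v
    have hxs : rootOf r x ≠ small := by
      intro hcon
      rw [hFB' x, if_pos hcon] at hx
      subst hx
      rw [hFBbig] at hcon
      exact hsmall_big_ne hcon.symm
    have hxold : rootOf r x = x := by
      rw [hFB' x, if_neg hxs] at hx; exact hx
    by_cases hxb : x = big
    · subst hxb
      rw [PySem.Dict.getD_insert_self]
      rw [hlandB v]
      constructor
      · intro hv
        rcases List.mem_append.mp hv with h | h
        · exact Or.inr ((hmembig v).mp h)
        · exact Or.inl ((hmemsmall v).mp h)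
      · rintro (h | h)
        · exact List.mem_append.mpr (Or.inr ((hmemsmall v).mpr h))
        · exact List.mem_append.mpr (Or.inl ((hmembig v).mpr h))
    · rw [PySem.Dict.getD_insert_of_ne _ _ _ hxb]
      rw [hMEM x hxold v]
      rw [hFB' v]
      have hxnes : x ≠ small := hxold ▸ hxs
      by_cases h : rootOf r v = small
      · simp only [if_pos h]
        constructor
        · intro hcon; exact absurd (h.symm.trans hcon).symm hxnes
        · intro hcon; exact absurd hcon.symm hxb
      · simp [h]
  · -- C'
    intro v w
    by_cases hv : get_root (p.insert RA RB) v = RB <;>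
      by_cases hw : get_root (p.insert RA RB) w = RB
    · rw [hv, hw]
      rw [(hlandAB v).mp hv, (hlandAB w).mp hw]
      simp
    · have hwB : rootOf ((mem.getD small [small]).foldl (fun d k => d.insert k big) r) w ≠ big :=
        fun h => hw ((hlandAB w).mpr h)
      rw [hv, (hlandAB v).mp hv]
      constructor
      · intro h; exact absurd h.symm hw
      · intro h; exact absurd h.symm hwB
    · have hvB : rootOf ((mem.getD small [small]).foldl (fun d k => d.insert k big) r) v ≠ big :=
        fun h => hv ((hlandAB v).mpr h)
      rw [hw, (hlandAB w).mp hw]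
      constructor
      · intro h; exact absurd h hv
      · intro h; exact absurd h hvB
    · have hvB := fun h => hv ((hlandAB v).mpr h)
      have hwB := fun h => hw ((hlandAB w).mpr h)
      rw [hoffA v hv, hoffA w hw, hoffB v hvB, hoffB w hwB]
      exact hC v w
  · -- S1'
    intro v
    by_cases h : get_root (p.insert RA RB) v = RB
    · have hB := (hlandAB v).mp h
      rw [h, hB, PySem.Dict.getD_insert_self, PySem.Dict.getD_insert_self]
      rw [hS1 a, hS1 b]
    · have hB := fun hh => h ((hlandAB v).mpr hh)
      rw [PySem.Dict.getD_insert_of_ne _ _ _ h, PySem.Dict.getD_insert_of_ne _ _ _ hB]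
      rw [hoffA v h, hoffB v hB]
      exact hS1 v

theorem loop_eq (qs : List (List Int)) (hq : ∀ q ∈ qs, 2 ≤ q.length)
    (ans : List Int) (p szA : PySem.Dict Int Int) (r : PySem.Dict Int Int)
    (mem : PySem.Dict Int (List Int)) (szB : PySem.Dict Int Int) (cur : Int)
    (hInv : CoupleInv p szA r mem szB) :
    (qs.foldl maxCircleStepA (ans, p, szA, cur)).1
      = (qs.foldl maxCircleStepB (ans, r, mem, szB, cur)).1 := by
  induction qs generalizing ans p szA r mem szB cur with
  | nil => rfl
  | cons q qs ih =>
    obtain ⟨a, b, t, rfl⟩ : ∃ a b t, q = a :: b :: t := by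
      match q, hq q (List.mem_cons_self ..) with
      | a :: b :: t, _ => exact ⟨a, b, t, rfl⟩
    have hq' : ∀ q ∈ qs, 2 ≤ q.length := fun q h => hq q (List.mem_cons_of_mem _ h)
    have hg0 : PySem.List.pyGet? (a :: b :: t) 0 = some a := by
      have h : (0:Int) ≤ (t.length:Int) + 1 := by positivity
      simp [PySem.List.pyGet?, PySem.List.pyIdx?, h]
    have hg1 : PySem.List.pyGet? (a :: b :: t) 1 = some b := by
      simp [PySem.List.pyGet?, PySem.List.pyIdx?]
    obtain ⟨hA1, hB2, hMEM, hC, hS1⟩ := hInv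
    have hInv : CoupleInv p szA r mem szB := ⟨hA1, hB2, hMEM, hC, hS1⟩
    have hfold : ∀ (d : PySem.Dict Int Int) (v : Int), d.getD v v = rootOf d v := fun _ _ => rfl
    simp only [List.foldl_cons, maxCircleStepA, maxCircleStepB, hg0, hg1, hfold]
    by_cases hbr : get_root p a = get_root p b
    · have hbrB : rootOf r a = rootOf r b := (hC a b).mp hbr
      simp only [if_pos hbr, if_pos hbrB]
      exact ih hq' _ _ _ _ _ _ _ hInv
    · have hbrB : ¬ rootOf r a = rootOf r b := fun h => hbr ((hC a b).mpr h)
      simp only [if_neg hbr, if_neg hbrB]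
      have hszA : ∀ k, (if szA.contains k then szA.getD k 1 else 1) = szA.getD k 1 := by
        intro k
        by_cases h : szA.contains k
        · simp [h]
        · simp only [Bool.not_eq_true] at h
          simp [h, PySem.Dict.getD_of_not_contains _ _ h]
      simp only [hszA]
      have hsa : szA.getD (get_root p a) 1 = szB.getD (rootOf r a) 1 := hS1 a
      have hsb : szA.getD (get_root p b) 1 = szB.getD (rootOf r b) 1 := hS1 b
      have hcur : max (szA.getD (get_root p a) 1 + szA.getD (get_root p b) 1) cur
          = (if cur < szB.getD (rootOf r a) 1 + szB.getD (rootOf r b) 1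
             then szB.getD (rootOf r a) 1 + szB.getD (rootOf r b) 1 else cur) := by
        rw [hsa, hsb]; omega
      rw [hcur]
      by_cases hlt : szB.getD (rootOf r a) 1 < szB.getD (rootOf r b) 1
      · simp only [if_pos hlt]
        exact ih hq' _ _ _ _ _ _ _
          (inv_step p szA r mem szB a b (rootOf r a) (rootOf r b) hInv hbr (Or.inl ⟨rfl, rfl⟩))
      · simp only [if_neg hlt]
        exact ih hq' _ _ _ _ _ _ _
          (inv_step p szA r mem szB a b (rootOf r b) (rootOf r a) hInv hbr (Or.inr ⟨rfl, rfl⟩))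

theorem inv_init : CoupleInv PySem.Dict.empty PySem.Dict.empty PySem.Dict.empty PySem.Dict.empty PySem.Dict.empty := by
  refine ⟨?_, ?_, ?_, ?_, ?_⟩ <;>
    simp [get_root, getRootF, rootOf, PySem.Dict.get?_empty, PySem.Dict.getD_empty,
      PySem.Dict.size_empty, eq_comm]

-- ===== VERDICT (by name: the statement is the Claim_ definition above) =====
theorem max_circle_spec : Claim_equal_max_circle := by
  intro queries _ hpre
  unfold Spec_max_circle max_circle max_circle_alt
  exact loop_eq queries hpre [] _ _ _ _ _ 1 inv_init
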